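-- pv_equiv track=rewrite | github.com/lavelock67/universal_symantics | uds_ingest_mining_enhanced.py | _categorize_attribute
-- ===== SOURCE A (Python) =====
-- def _categorize_attribute(attribute: str) -> str:
--     """Categorize an attribute."""
--     attribute_categories = {
--         'semantic': ['agent', 'patient', 'theme', 'goal', 'source', 'path', 'location', 'time'],
--         'temporal': ['duration', 'frequency', 'aspect', 'tense', 'mood'],
--         'modality': ['necessity', 'possibility', 'ability', 'permission', 'obligation'],
--         'polarity': ['positive', 'negative', 'neutral'],
--         'intensity': ['high', 'medium', 'low', 'extreme'],
--         'causality': ['cause', 'effect', 'condition', 'purpose', 'result']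
--     }
--
--     for category, attrs in attribute_categories.items():
--         if attribute in attrs:
--             return category
--
--     return 'general'
-- ===== SOURCE B (Python) =====
-- # Binary search over a sorted attribute table instead of scanning category lists.
-- _SORTED_ATTRS = [
--     'ability', 'agent', 'aspect', 'cause', 'condition', 'duration', 'effect',
--     'extreme', 'frequency', 'goal', 'high', 'location', 'low', 'medium',
--     'mood', 'necessity', 'negative', 'neutral', 'obligation', 'path',
--     'patient', 'permission', 'positive', 'possibility', 'purpose', 'result',
--     'source', 'tense', 'theme', 'time',
-- ]
-- _SORTED_CATS = [
--     'modality', 'semantic', 'temporal', 'causality', 'causality', 'temporal',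
--     'causality', 'intensity', 'temporal', 'semantic', 'intensity', 'semantic',
--     'intensity', 'intensity', 'temporal', 'modality', 'polarity', 'polarity',
--     'modality', 'semantic', 'semantic', 'modality', 'polarity', 'modality',
--     'causality', 'causality', 'semantic', 'temporal', 'semantic', 'semantic',
-- ]
--
--
-- def _categorize_attribute(attribute: str) -> str:
--     """Categorize an attribute by binary search in a sorted attribute table."""
--     lo, hi = 0, len(_SORTED_ATTRS)
--     while lo < hi:
--         mid = (lo + hi) // 2
--         if _SORTED_ATTRS[mid] < attribute:
--             lo = mid + 1
--         else:
--             hi = mid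
--     if lo < len(_SORTED_ATTRS) and _SORTED_ATTRS[lo] == attribute:
--         return _SORTED_CATS[lo]
--     return 'general'
-- ===== Notes on version B (the rewrite author's own statement) =====
-- stated objective: alternative
-- what changed: Replaces the per-category linear membership scans by a binary search (lower-bound loop) over one pre-sorted flat attribute array with a parallel category array, falling back to 'general' when the probed slot does not hold the attribute.
import Mathlib
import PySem

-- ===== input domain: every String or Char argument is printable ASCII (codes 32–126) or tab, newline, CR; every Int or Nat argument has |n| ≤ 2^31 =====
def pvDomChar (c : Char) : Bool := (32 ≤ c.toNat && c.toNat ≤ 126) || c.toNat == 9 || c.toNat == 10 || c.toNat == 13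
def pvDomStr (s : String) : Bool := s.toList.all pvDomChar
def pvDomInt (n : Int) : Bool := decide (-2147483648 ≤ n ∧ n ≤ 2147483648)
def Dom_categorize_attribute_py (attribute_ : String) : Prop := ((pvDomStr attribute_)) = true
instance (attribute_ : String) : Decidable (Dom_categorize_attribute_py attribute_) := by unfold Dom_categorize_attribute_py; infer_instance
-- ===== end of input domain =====

-- B replaces A's per-category linear membership scans by a binary search over a pre-sorted flat attribute array (alternative).

-- ===== PORT A =====
-- the category→attributes dict literal of A, as an insertion-ordered association list
def pvCatsA : List (String × List String) :=
  [("semantic", ["agent", "patient", "theme", "goal", "source", "path", "location", "time"]),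
   ("temporal", ["duration", "frequency", "aspect", "tense", "mood"]),
   ("modality", ["necessity", "possibility", "ability", "permission", "obligation"]),
   ("polarity", ["positive", "negative", "neutral"]),
   ("intensity", ["high", "medium", "low", "extreme"]),
   ("causality", ["cause", "effect", "condition", "purpose", "result"])]

-- the 'for category, attrs in …: if attribute in attrs: return category' loop
def pvLoopA (attribute_ : String) : List (String × List String) → String
  | [] => "general"
  | (category, attrs) :: rest =>
      if attrs.contains attribute_ then category else pvLoopA attribute_ rest

def categorize_attribute_py (attribute_ : String) : String :=
  pvLoopA attribute_ pvCatsA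

-- ===== PORT B =====
-- the sorted attribute array and its parallel category array (Source B's module constants)
def pvSortedAttrs : List String :=
  ["ability", "agent", "aspect", "cause", "condition", "duration", "effect",
   "extreme", "frequency", "goal", "high", "location", "low", "medium",
   "mood", "necessity", "negative", "neutral", "obligation", "path",
   "patient", "permission", "positive", "possibility", "purpose", "result",
   "source", "tense", "theme", "time"]

def pvSortedCats : List String :=
  ["modality", "semantic", "temporal", "causality", "causality", "temporal",
   "causality", "intensity", "temporal", "semantic", "intensity", "semantic",
   "intensity", "intensity", "temporal", "modality", "polarity", "polarity",
   "modality", "semantic", "semantic", "modality", "polarity", "modality",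
   "causality", "causality", "semantic", "temporal", "semantic", "semantic"]

-- the 'while lo < hi' lower-bound binary-search loop of Source B; fuel only makes the
-- recursion structural (hi - lo shrinks each step, so fuel = initial hi never runs out)
def pvBSearch (attribute_ : String) : Nat → Nat → Nat → Nat
  | 0, lo, _hi => lo
  | fuel + 1, lo, hi =>
    if lo < hi then
      -- Python's str '<' ported exactly via PySem.Chars.strLt (code-point lexicographic)
      if PySem.Chars.strLt (pvSortedAttrs.getD ((lo + hi) / 2) "").toList attribute_.toList then
        pvBSearch attribute_ fuel ((lo + hi) / 2 + 1) hi
      else pvBSearch attribute_ fuel lo ((lo + hi) / 2)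
    else lo

def categorize_attribute_py_alt (attribute_ : String) : String :=
  if pvBSearch attribute_ pvSortedAttrs.length 0 pvSortedAttrs.length < pvSortedAttrs.length ∧
      pvSortedAttrs.getD (pvBSearch attribute_ pvSortedAttrs.length 0 pvSortedAttrs.length) "" = attribute_ then
    pvSortedCats.getD (pvBSearch attribute_ pvSortedAttrs.length 0 pvSortedAttrs.length) "general"
  else "general"

-- ===== PRECONDITION & SPEC =====
def Spec_categorize_attribute_py (attribute_ : String) (out : String) : Prop := out = categorize_attribute_py_alt attribute_
instance (attribute_ : String) (out : String) : Decidable (Spec_categorize_attribute_py attribute_ out) := by unfold Spec_categorize_attribute_py; infer_instance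

-- ===== CLAIM (what is proved, stated in full; the proofs are below) =====
def Claim_equal_categorize_attribute_py : Prop := ∀ (attribute_ : String), Dom_categorize_attribute_py attribute_ → Spec_categorize_attribute_py attribute_ (categorize_attribute_py attribute_)

-- ===== LEMMAS AND PROOFS =====
-- whatever index the search lands on, a hit in the final check means the attribute is in the table
theorem pv_alt_not_mem (a : String) (h : a ∉ pvSortedAttrs) :
    categorize_attribute_py_alt a = "general" := by
  unfold categorize_attribute_py_alt
  split
  · next hc =>
      exfalso
      apply h
      rw [← hc.2]
      exact List.getD_eq_getElem _ _ hc.1 ▸ List.getElem_mem _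
  · rfl

theorem pv_A_not_mem (a : String) (h : a ∉ pvSortedAttrs) :
    categorize_attribute_py a = "general" := by
  simp only [pvSortedAttrs, List.mem_cons, List.not_mem_nil, or_false, not_or] at h
  obtain ⟨h0, h1, h2, h3, h4, h5, h6, h7, h8, h9, h10, h11, h12, h13, h14, h15,
    h16, h17, h18, h19, h20, h21, h22, h23, h24, h25, h26, h27, h28, h29⟩ := h
  simp [categorize_attribute_py, pvCatsA, pvLoopA,
    h0, h1, h2, h3, h4, h5, h6, h7, h8, h9, h10, h11, h12, h13, h14, h15,
    h16, h17, h18, h19, h20, h21, h22, h23, h24, h25, h26, h27, h28, h29]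

theorem pv_eq (a : String) : categorize_attribute_py a = categorize_attribute_py_alt a := by
  by_cases hm : a ∈ pvSortedAttrs
  · fin_cases hm <;> decide
  · rw [pv_alt_not_mem a hm, pv_A_not_mem a hm]

-- ===== VERDICT (by name: the statement is the Claim_ definition above) =====
theorem categorize_attribute_py_spec : Claim_equal_categorize_attribute_py := by
  intro a _
  exact pv_eq a
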